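-- pv_equiv track=rewrite | github.com/almirgon/LabP1 | Unidade-6/comeram.py | quantos_comeram
-- ===== SOURCE A (Python) =====
-- def quantos_comeram(N, fila):
-- 	acumulador = 0
-- 	for i in range(len(fila)):
-- 		if fila[i] <= N:
-- 			acumulador += fila[i]
-- 			N -= fila[i]
-- 		else:
-- 			break
-- 	return acumulador
-- ===== SOURCE B (Python) =====
-- def quantos_comeram(N, fila):
--     prefixes = []
--     s = 0
--     for x in fila:
--         s += x
--         prefixes.append(s)
--     k = next((i for i, p in enumerate(prefixes) if p > N), len(fila))
--     return sum(fila[:k])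
-- ===== Notes on version B (the rewrite author's own statement) =====
-- stated objective: alternative
-- what changed: B works in three staged passes with no early-stopping consume loop: it builds the full prefix-sum list of fila, locates the first index whose prefix sum exceeds the fixed budget N, and finally returns sum(fila[:k]) of that slice, instead of A's single loop that breaks while decrementing a remaining budget and maintaining an accumulator.
import Mathlib
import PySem

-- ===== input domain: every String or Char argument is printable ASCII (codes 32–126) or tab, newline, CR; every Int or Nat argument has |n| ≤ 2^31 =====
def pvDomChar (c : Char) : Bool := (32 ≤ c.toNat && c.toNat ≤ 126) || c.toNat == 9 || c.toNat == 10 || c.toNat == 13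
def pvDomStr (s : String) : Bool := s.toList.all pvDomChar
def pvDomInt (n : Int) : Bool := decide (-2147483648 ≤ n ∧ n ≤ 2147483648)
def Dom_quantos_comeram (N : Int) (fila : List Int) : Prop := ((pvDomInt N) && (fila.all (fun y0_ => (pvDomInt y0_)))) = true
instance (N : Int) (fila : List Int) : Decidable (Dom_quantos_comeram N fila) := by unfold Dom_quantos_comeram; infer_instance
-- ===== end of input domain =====

-- B replaces A's early-stopping budget loop by three staged passes (prefix sums, first over-budget index, slice sum); same values, same O(n) cost.

-- ===== PORT A =====
-- A's loop with break, as structural recursion over fila carrying the remaining budget N: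
def quantos_comeram (N : Int) (fila : List Int) : Int :=
  match fila with
  | [] => 0
  | x :: xs => if x ≤ N then x + quantos_comeram (N - x) xs else 0

-- ===== PORT B =====
-- pass 1: running prefix sums of fila (s starts at c)
def pvPrefixes (c : Int) (xs : List Int) : List Int :=
  match xs with
  | [] => []
  | x :: xs => (c + x) :: pvPrefixes (c + x) xs

-- B: first index whose prefix sum exceeds N (default len(fila)), then sum of fila[:k]
def quantos_comeram_alt (N : Int) (fila : List Int) : Int :=
  let k := ((pvPrefixes 0 fila).findIdx? (fun p => N < p)).getD fila.length
  (fila.take k).sum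

-- ===== PRECONDITION & SPEC =====
def Spec_quantos_comeram (N : Int) (fila : List Int) (out : Int) : Prop := out = quantos_comeram_alt N fila
instance (N : Int) (fila : List Int) (out : Int) : Decidable (Spec_quantos_comeram N fila out) := by unfold Spec_quantos_comeram; infer_instance

-- ===== CLAIM (what is proved, stated in full; the proofs are below) =====
def Claim_equal_quantos_comeram : Prop := ∀ (N : Int) (fila : List Int), Dom_quantos_comeram N fila → Spec_quantos_comeram N fila (quantos_comeram N fila)

-- ===== LEMMAS AND PROOFS =====
theorem pv_key (xs : List Int) : ∀ (c N : Int),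
    (xs.take ((((pvPrefixes c xs).findIdx? (fun p => N < p)).getD xs.length))).sum
      = quantos_comeram (N - c) xs := by
  induction xs with
  | nil => intro c N; simp [pvPrefixes, quantos_comeram]
  | cons x xs ih =>
    intro c N
    by_cases h : x ≤ N - c
    · have hb : ¬ (N < c + x) := by omega
      have hih := ih (c + x) N
      have hNc : N - (c + x) = N - c - x := by ring
      rw [hNc] at hih
      simp only [pvPrefixes, quantos_comeram, List.findIdx?_cons, hb, decide_false, if_pos h]
      rcases ho : (pvPrefixes (c + x) xs).findIdx? (fun p => N < p) with _ | i <;>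
        rw [ho] at hih <;> simp at hih <;> simp [hih]
    · have hb : N < c + x := by omega
      simp [pvPrefixes, quantos_comeram, List.findIdx?_cons, hb, h]

-- ===== VERDICT (by name: the statement is the Claim_ definition above) =====
theorem quantos_comeram_spec : Claim_equal_quantos_comeram := by
  intro N fila _
  unfold Spec_quantos_comeram quantos_comeram_alt
  have := pv_key fila 0 N
  simpa using this.symm
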